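-- pv_equiv track=rewrite | github.com/jantman/pypi-download-stats | pypi_download_stats/outputgenerator.py | _data_dict_to_bokeh_chart_data
-- ===== SOURCE A (Python) =====
-- def _data_dict_to_bokeh_chart_data(data):
--     """
--     Take a dictionary of data, as returned by the :py:class:`~.ProjectStats`
--     per_*_data properties, return a 2-tuple of data dict and x labels list
--     usable by bokeh.charts.
--
--     :param data: data dict from :py:class:`~.ProjectStats` property
--     :type data: dict
--     :return: 2-tuple of data dict, x labels list
--     :rtype: tuple
--     """
--     labels = []
--     # find all the data keys
--     keys = set()
--     for date in data:
--         for k in data[date]: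
--             keys.add(k)
--     # final output dict
--     out_data = {}
--     for k in keys:
--         out_data[k] = []
--     # transform the data; deal with sparse data
--     for data_date, data_dict in sorted(data.items()):
--         labels.append(data_date)
--         for k in out_data:
--             if k in data_dict:
--                 out_data[k].append(data_dict[k])
--             else:
--                 out_data[k].append(0)
--     return out_data, labels
-- ===== SOURCE B (Python) =====
-- def _data_dict_to_bokeh_chart_data(data):
--     # Build a transposed sparse index first: cols[k] is a dict mapping date -> value.
--     cols = {}
--     for date, dd in data.items():
--         for k, v in dd.items():
--             cols.setdefault(k, {})[date] = v
--     labels = sorted(data)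
--     # densify each key's column by looking the sorted dates up in its own index
--     out_data = {k: [dmap.get(d, 0) for d in labels] for k, dmap in cols.items()}
--     return out_data, labels
-- ===== Notes on version B (the rewrite author's own statement) =====
-- stated objective: alternative
-- what changed: B first transposes the sparse structure into an index cols[k] = {date: value} in one pass over the raw data (no key set, no per-date membership tests), then densifies each key's column by looking the sorted date labels up in that key's own small index, instead of A's dense fill that walks the sorted dates and appends a value-or-0 to every key's list.
import Mathlib
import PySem

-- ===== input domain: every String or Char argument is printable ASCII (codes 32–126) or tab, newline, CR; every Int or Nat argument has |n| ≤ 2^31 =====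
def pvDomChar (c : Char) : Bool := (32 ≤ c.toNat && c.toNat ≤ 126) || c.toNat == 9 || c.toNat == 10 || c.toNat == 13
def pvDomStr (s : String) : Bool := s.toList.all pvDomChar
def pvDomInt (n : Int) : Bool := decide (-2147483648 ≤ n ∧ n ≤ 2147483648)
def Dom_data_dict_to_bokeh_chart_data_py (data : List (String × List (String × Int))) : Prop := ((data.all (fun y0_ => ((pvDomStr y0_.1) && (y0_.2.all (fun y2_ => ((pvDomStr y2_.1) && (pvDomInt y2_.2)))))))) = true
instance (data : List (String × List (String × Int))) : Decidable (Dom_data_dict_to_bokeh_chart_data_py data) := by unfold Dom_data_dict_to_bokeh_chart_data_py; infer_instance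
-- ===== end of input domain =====

-- B transposes the sparse structure into a per-key date->value index in one raw pass,
-- then densifies each key's column by looking the sorted labels up in that index,
-- instead of A's key-set + dense per-date fill; objective: alternative.


-- ===== PORT A =====
-- The Python receives a dict of dicts; the association-list argument is decoded with
-- PySem.Dict.ofList (duplicate keys: last value, first position — Python dict semantics).
def data_dict_to_bokeh_chart_data_py (data : List (String × List (String × Int))) : (List (String × List Int)) × List String :=
  let d : PySem.Dict String (PySem.Dict String Int) :=
    PySem.Dict.ofList (data.map (fun p => (p.1, PySem.Dict.ofList p.2)))
  -- keys = set(); for date in data: for k in data[date]: keys.add(k)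
  let keys : PySem.Set String :=
    d.items.foldl (fun s p => p.2.keys.foldl (fun s k => PySem.Set.add s k) s) PySem.Set.empty
  -- out_data = {}; for k in keys: out_data[k] = []
  let od0 : PySem.Dict String (List Int) :=
    keys.foldl (fun od k => od.insert k ([] : List Int)) PySem.Dict.empty
  -- for data_date, data_dict in sorted(data.items()): labels.append(data_date); for k in out_data: ...
  let st :=
    (PySem.List.sorted d.items (fun p => p.1)).foldl
      (fun (st : PySem.Dict String (List Int) × List String) p =>
        (st.1.keys.foldl
           (fun od k =>
             od.insert k (od.getD k [] ++ [if p.2.contains k then p.2.getD k 0 else 0]))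
           st.1,
         st.2 ++ [p.1]))
      (od0, ([] : List String))
  (st.1.items, st.2)

-- ===== PORT B =====
def data_dict_to_bokeh_chart_data_py_alt (data : List (String × List (String × Int))) : (List (String × List Int)) × List String :=
  let d : PySem.Dict String (PySem.Dict String Int) :=
    PySem.Dict.ofList (data.map (fun p => (p.1, PySem.Dict.ofList p.2)))
  -- cols = {}; for date, dd in data.items(): for k, v in dd.items(): cols.setdefault(k, {})[date] = v
  let cols : PySem.Dict String (PySem.Dict String Int) :=
    d.items.foldl
      (fun c p =>
        p.2.items.foldl
          (fun c q => c.insert q.1 ((c.getD q.1 PySem.Dict.empty).insert p.1 q.2)) c)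
      PySem.Dict.empty
  -- labels = sorted(data)
  let labels := PySem.List.sorted d.keys (fun x => x) false
  -- out_data = {k: [dmap.get(dt, 0) for dt in labels] for k, dmap in cols.items()}
  (cols.items.map (fun p => (p.1, labels.map (fun dt => p.2.getD dt 0))), labels)

-- ===== PRECONDITION & SPEC =====
def Spec_data_dict_to_bokeh_chart_data_py (data : List (String × List (String × Int))) (out : (List (String × List Int)) × List String) : Prop := out = data_dict_to_bokeh_chart_data_py_alt data
instance (data : List (String × List (String × Int))) (out : (List (String × List Int)) × List String) : Decidable (Spec_data_dict_to_bokeh_chart_data_py data out) := by unfold Spec_data_dict_to_bokeh_chart_data_py; infer_instance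

-- ===== CLAIM (what is proved, stated in full; the proofs are below) =====
def Claim_equal_data_dict_to_bokeh_chart_data_py : Prop := ∀ (data : List (String × List (String × Int))), Dom_data_dict_to_bokeh_chart_data_py data → Spec_data_dict_to_bokeh_chart_data_py data (data_dict_to_bokeh_chart_data_py data)

-- ===== LEMMAS AND PROOFS =====

-- mapping the sort key over a stable sort-by-key is the sort of the mapped keys
theorem map_key_sorted {α κ : Type} [LinearOrder κ] (xs : List α) (key : α → κ) :
    (PySem.List.sorted xs key false).map key = PySem.List.sorted (xs.map key) (fun x => x) false := by
  exact Eq.symm <| PySem.List.sorted_id_eq_of_perm_of_pairwise (xs.map key)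
    ((PySem.List.sorted xs key false).map key)
    ((PySem.List.sorted_perm xs key false).map key)
    (PySem.List.sorted_map_key_pairwise xs key)

-- s.update(s) = s
theorem set_update_self {α : Type} [BEq α] [LawfulBEq α] (s : PySem.Set α) :
    PySem.Set.update s s = s := by
  rw [PySem.Set.update_eq_append_filter]
  have h : (PySem.Set.ofList s).filter (fun y => !(PySem.Set.contains s y)) = [] := by
    apply List.filter_eq_nil_iff.mpr
    intro y hy
    have hys : y ∈ s := (PySem.Set.mem_ofList s y).mp hy
    simpa using hys
  rw [h, List.append_nil]

-- value at k after A's inner append-to-every-column fold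
theorem getD_inner_fold (ks : List String) (o : PySem.Dict String (List Int))
    (f : String → Int) (hnd : ks.Nodup) (k : String) :
    (ks.foldl (fun o k => o.insert k (o.getD k [] ++ [f k])) o).getD k []
      = if k ∈ ks then o.getD k [] ++ [f k] else o.getD k [] := by
  induction ks generalizing o with
  | nil => simp
  | cons j rest ih =>
    have hnd' : rest.Nodup := hnd.of_cons
    simp only [List.foldl_cons]
    rw [ih _ hnd']
    by_cases hkj : k = j
    · subst hkj
      have hkr : k ∉ rest := (List.nodup_cons.mp hnd).1
      simp [hkr, PySem.Dict.getD_insert_self]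
    · rw [PySem.Dict.getD_insert_of_ne o _ _ hkj]
      simp [hkj]

-- A's outer loop invariant: keys stay fixed, each key's column grows by one entry per row
theorem outer_fold_spec (rows : List (String × PySem.Dict String Int))
    (od : PySem.Dict String (List Int)) (hnd : od.keys.Nodup) :
    (rows.foldl
      (fun od p => od.keys.foldl
        (fun o k => o.insert k (o.getD k [] ++ [if p.2.contains k then p.2.getD k 0 else 0])) od)
      od).keys = od.keys ∧ ∀ k ∈ od.keys,
      (rows.foldl
        (fun od p => od.keys.foldl
          (fun o k => o.insert k (o.getD k [] ++ [if p.2.contains k then p.2.getD k 0 else 0])) od)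
        od).getD k [] = od.getD k []
        ++ rows.map (fun p => if p.2.contains k then p.2.getD k 0 else 0) := by
  induction rows generalizing od with
  | nil => exact ⟨rfl, by simp⟩
  | cons p rest ih =>
    simp only [List.foldl_cons, List.map_cons]
    have hkeys1 : (od.keys.foldl
        (fun o k => o.insert k (o.getD k [] ++ [if p.2.contains k then p.2.getD k 0 else 0])) od).keys
        = od.keys := by
      rw [PySem.Dict.keys_foldl_insert, set_update_self]
    obtain ⟨ihk, ihv⟩ := ih _ (by rw [hkeys1]; exact hnd)
    refine ⟨by rw [ihk, hkeys1], ?_⟩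
    intro k hk
    rw [ihv k (by rw [hkeys1]; exact hk)]
    rw [getD_inner_fold _ _ _ hnd k]
    simp [hk, List.append_assoc]

-- od0 = {k: [] for k in keys}  (fresh distinct keys into an empty dict)
theorem od0_items (keys : List String) (hnd : keys.Nodup) :
    (keys.foldl (fun od k => od.insert k ([] : List Int)) PySem.Dict.empty).items
      = keys.map (fun k => (k, ([] : List Int))) := by
  have := PySem.Dict.items_foldl_insert_fresh (l := keys) (k := fun x => x)
    (v := fun _ => ([] : List Int)) (d := PySem.Dict.empty)
    (by intro a _; exact PySem.Dict.contains_empty a) (by simpa using hnd)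
  simpa using this

-- A's key-gathering loop IS the fold of Set.update (add fold = update, definitionally)
theorem keys_eq (l : List (String × PySem.Dict String Int)) :
    l.foldl (fun s p => p.2.keys.foldl (fun s k => PySem.Set.add s k) s) PySem.Set.empty
      = l.foldl (fun s p => PySem.Set.update s p.2.keys) PySem.Set.empty := rfl

theorem keys_nodup (l : List (String × PySem.Dict String Int)) (s : PySem.Set String)
    (hs : s.Nodup) :
    (l.foldl (fun s p => PySem.Set.update s p.2.keys) s).Nodup := by
  induction l generalizing s with
  | nil => exact hs
  | cons p rest ih => exact ih _ (PySem.Set.nodup_update s p.2.keys hs)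

-- A's outer loop's two accumulator components (matrix, labels) evolve independently
theorem pair_fold_split (rows : List (String × PySem.Dict String Int))
    (od : PySem.Dict String (List Int)) (lab : List String) :
    rows.foldl (fun st p =>
        (st.1.keys.foldl
          (fun o k => o.insert k (o.getD k [] ++ [if p.2.contains k then p.2.getD k 0 else 0]))
          st.1,
         st.2 ++ [p.1])) (od, lab)
      = (rows.foldl (fun od p => od.keys.foldl
          (fun o k => o.insert k (o.getD k [] ++ [if p.2.contains k then p.2.getD k 0 else 0]))
          od) od,
         lab ++ rows.map (fun p => p.1)) := by
  induction rows generalizing od lab with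
  | nil => simp
  | cons p rest ih =>
    simp only [List.foldl_cons, List.map_cons]
    rw [ih]
    simp

-- ===== B-side lemmas: the transposed index =====

-- a key not mentioned in the row's items keeps its whole column
theorem inner_col_unchanged (qs : List (String × Int)) (dt0 : String)
    (c : PySem.Dict String (PySem.Dict String Int)) (k : String)
    (hk : k ∉ qs.map Prod.fst) :
    (qs.foldl (fun c q => c.insert q.1 ((c.getD q.1 PySem.Dict.empty).insert dt0 q.2)) c).getD k PySem.Dict.empty
      = c.getD k PySem.Dict.empty := by
  induction qs generalizing c with
  | nil => rfl
  | cons q rest ih =>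
    simp only [List.map_cons, List.mem_cons, not_or] at hk
    simp only [List.foldl_cons]
    rw [ih _ hk.2, PySem.Dict.getD_insert_of_ne _ _ _ hk.1]

-- the inner fold only writes at date dt0: other dates' entries are untouched
theorem inner_other_date (qs : List (String × Int)) (dt0 : String)
    (c : PySem.Dict String (PySem.Dict String Int)) (k dt : String) (hdt : dt ≠ dt0) :
    ((qs.foldl (fun c q => c.insert q.1 ((c.getD q.1 PySem.Dict.empty).insert dt0 q.2)) c).getD k PySem.Dict.empty).getD dt 0
      = (c.getD k PySem.Dict.empty).getD dt 0 := by
  induction qs generalizing c with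
  | nil => rfl
  | cons q rest ih =>
    simp only [List.foldl_cons]
    rw [ih]
    rw [PySem.Dict.getD_insert]
    split_ifs with h
    · rw [h, PySem.Dict.getD_insert_of_ne _ _ _ hdt]
    · rfl

-- at date dt0 the inner fold writes exactly the row's own (first-match) value
theorem inner_self_date (qs : List (String × Int)) (dt0 : String)
    (c : PySem.Dict String (PySem.Dict String Int)) (k : String)
    (hnd : (qs.map Prod.fst).Nodup) :
    ((qs.foldl (fun c q => c.insert q.1 ((c.getD q.1 PySem.Dict.empty).insert dt0 q.2)) c).getD k PySem.Dict.empty).getD dt0 0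
      = match qs.find? (fun q => q.1 == k) with
        | some q => q.2
        | none => (c.getD k PySem.Dict.empty).getD dt0 0 := by
  induction qs generalizing c with
  | nil => rfl
  | cons q rest ih =>
    simp only [List.map_cons, List.nodup_cons] at hnd
    simp only [List.foldl_cons, List.find?_cons]
    by_cases hk : q.1 = k
    · have : (q.1 == k) = true := by simpa using hk
      rw [this]
      rw [inner_col_unchanged rest dt0 _ k (by rw [← hk]; exact hnd.1)]
      rw [hk, PySem.Dict.getD_insert_self, PySem.Dict.getD_insert_self]
    · have : (q.1 == k) = false := by simpa using hk
      rw [this]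
      rw [ih _ hnd.2]
      have hne : k ≠ q.1 := fun h => hk h.symm
      rw [PySem.Dict.getD_insert_of_ne _ _ _ hne]

-- first match in a dict's items IS get?
theorem find?_items_eq_get? (dd : PySem.Dict String Int) (k : String) :
    (dd.items.find? (fun q => q.1 == k)).map Prod.snd = dd.get? k := by
  obtain ⟨l⟩ := dd
  induction l with
  | nil => rfl
  | cons q rest ih =>
    rw [show (PySem.Dict.mk (q :: rest)).items = q :: (PySem.Dict.mk rest).items from rfl]
    rw [List.find?_cons, PySem.Dict.get?_mk_cons]
    by_cases h : (q.1 == k) = true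
    · rw [h]; simp
    · rw [Bool.not_eq_true] at h
      rw [h]
      simpa using ih

-- inner fold, summarised against the row's dict
theorem inner_spec (dd : PySem.Dict String Int) (dt0 : String)
    (c : PySem.Dict String (PySem.Dict String Int)) (k : String) (hnd : dd.keys.Nodup) :
    ((dd.items.foldl (fun c q => c.insert q.1 ((c.getD q.1 PySem.Dict.empty).insert dt0 q.2)) c).getD k PySem.Dict.empty).getD dt0 0
      = if dd.contains k then dd.getD k 0 else (c.getD k PySem.Dict.empty).getD dt0 0 := by
  rw [inner_self_date dd.items dt0 c k hnd]
  have hf := find?_items_eq_get? dd k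
  rw [PySem.Dict.getD_eq_get?_getD, PySem.Dict.contains_eq_isSome_get?]
  cases hg : dd.get? k with
  | none =>
    rw [hg] at hf
    cases hfind : dd.items.find? (fun q => q.1 == k) with
    | none => simp
    | some q => rw [hfind] at hf; simp at hf
  | some v =>
    rw [hg] at hf
    cases hfind : dd.items.find? (fun q => q.1 == k) with
    | none => rw [hfind] at hf; simp at hf
    | some q =>
      rw [hfind] at hf
      simp only [Option.map_some, Option.some.injEq] at hf
      simp [hf, PySem.Dict.getD_eq_get?_getD, hg]

-- membership in the items of a dict built by an insert-fold / ofList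
theorem mem_items_foldl_insert {κ ν : Type} [BEq κ] [LawfulBEq κ]
    (l : List (κ × ν)) (d : PySem.Dict κ ν) (p : κ × ν)
    (h : p ∈ (l.foldl (fun d q => d.insert q.1 q.2) d).items) : p ∈ d.items ∨ p ∈ l := by
  induction l generalizing d with
  | nil => exact Or.inl h
  | cons q rest ih =>
    rcases ih _ h with h' | h'
    · rcases (PySem.Dict.mem_items_insert _ _ _ _).mp h' with h'' | h''
      · right; simp [h'']
      · exact Or.inl h''.1
    · right; right; exact h'

theorem mem_items_ofList {κ ν : Type} [BEq κ] [LawfulBEq κ]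
    (l : List (κ × ν)) (p : κ × ν) (h : p ∈ (PySem.Dict.ofList l).items) : p ∈ l := by
  have := mem_items_foldl_insert l PySem.Dict.empty p (by exact h)
  simpa [PySem.Dict.empty] using this

-- dates not occurring in the remaining rows keep their column entries through the outer fold
theorem outer_unchanged (rows : List (String × PySem.Dict String Int))
    (c : PySem.Dict String (PySem.Dict String Int)) (k dt : String)
    (hdt : dt ∉ rows.map Prod.fst) :
    ((rows.foldl
        (fun c p => p.2.items.foldl
          (fun c q => c.insert q.1 ((c.getD q.1 PySem.Dict.empty).insert p.1 q.2)) c)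
        c).getD k PySem.Dict.empty).getD dt 0
      = (c.getD k PySem.Dict.empty).getD dt 0 := by
  induction rows generalizing c with
  | nil => rfl
  | cons r rest ih =>
    simp only [List.map_cons, List.mem_cons, not_or] at hdt
    simp only [List.foldl_cons]
    rw [ih _ hdt.2, inner_other_date _ _ _ _ _ hdt.1]

-- main invariant of B's transposition pass: for every row (date, dd) of the data and every
-- key k, the transposed index holds at (k, date) exactly dd's value at k (default 0)
theorem outer_main (rows : List (String × PySem.Dict String Int))
    (c : PySem.Dict String (PySem.Dict String Int))
    (hdates : (rows.map Prod.fst).Nodup)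
    (hrows : ∀ p ∈ rows, p.2.keys.Nodup)
    (hc : ∀ k dt, dt ∈ rows.map Prod.fst → (c.getD k PySem.Dict.empty).getD dt 0 = 0) :
    ∀ p ∈ rows, ∀ k,
      ((rows.foldl
          (fun c p => p.2.items.foldl
            (fun c q => c.insert q.1 ((c.getD q.1 PySem.Dict.empty).insert p.1 q.2)) c)
          c).getD k PySem.Dict.empty).getD p.1 0 = p.2.getD k 0 := by
  induction rows generalizing c with
  | nil => intro p hp; exact absurd hp (List.not_mem_nil)
  | cons r rest ih =>
    simp only [List.map_cons, List.nodup_cons] at hdates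
    intro p hp k
    simp only [List.foldl_cons]
    rcases List.mem_cons.mp hp with hpr | hpr
    · subst hpr
      rw [outer_unchanged rest _ k p.1 hdates.1]
      rw [inner_spec p.2 p.1 c k (hrows p (List.mem_cons_self))]
      split_ifs with h
      · rfl
      · rw [hc k p.1 (by simp), PySem.Dict.getD_of_not_contains _ _ (by simpa using h)]
    · refine ih _ hdates.2 (fun q hq => hrows q (List.mem_cons_of_mem _ hq)) ?_ p hpr k
      intro k' dt hdt
      have hne : dt ≠ r.1 := fun h => hdates.1 (h ▸ hdt)
      rw [inner_other_date _ _ _ _ _ hne]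
      exact hc k' dt (List.mem_cons_of_mem _ hdt)

-- the transposed index's keys are exactly A's gathered key set (same first-appearance order)
theorem cols_keys (rows : List (String × PySem.Dict String Int))
    (c : PySem.Dict String (PySem.Dict String Int)) :
    (rows.foldl
        (fun c p => p.2.items.foldl
          (fun c q => c.insert q.1 ((c.getD q.1 PySem.Dict.empty).insert p.1 q.2)) c)
        c).keys
      = rows.foldl (fun s p => PySem.Set.update s p.2.keys) c.keys := by
  induction rows generalizing c with
  | nil => rfl
  | cons r rest ih =>
    simp only [List.foldl_cons]
    rw [ih]
    congr 1
    have := PySem.Dict.keys_foldl_insert_key (l := r.2.items) (key := Prod.fst)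
      (f := fun c q => (c.getD q.1 PySem.Dict.empty).insert r.1 q.2) (d := c)
    simpa [PySem.Dict.keys] using this

-- ===== VERDICT (by name: the statement is the Claim_ definition above) =====
theorem data_dict_to_bokeh_chart_data_py_spec : Claim_equal_data_dict_to_bokeh_chart_data_py := by
  intro data _
  unfold Spec_data_dict_to_bokeh_chart_data_py
  unfold data_dict_to_bokeh_chart_data_py data_dict_to_bokeh_chart_data_py_alt
  dsimp only
  set d : PySem.Dict String (PySem.Dict String Int) :=
    PySem.Dict.ofList (data.map (fun p => (p.1, PySem.Dict.ofList p.2))) with hd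
  rw [keys_eq]
  set keys : PySem.Set String :=
    d.items.foldl (fun s p => PySem.Set.update s p.2.keys) PySem.Set.empty with hkeys
  rw [pair_fold_split]
  have hndk : d.keys.Nodup := PySem.Dict.nodup_keys_ofList _
  have hknd : keys.Nodup := keys_nodup d.items PySem.Set.empty List.nodup_nil
  set od0 := keys.foldl (fun od k => od.insert k ([] : List Int)) PySem.Dict.empty with hod0def
  have hod0 : od0.items = keys.map (fun k => (k, ([] : List Int))) := od0_items keys hknd
  have hod0keys : od0.keys = keys := by
    show od0.items.map Prod.fst = keys
    rw [hod0, List.map_map]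
    have hc : (Prod.fst ∘ fun k : String => (k, ([] : List Int))) = id := rfl
    rw [hc, List.map_id]
  have hod0knd : od0.keys.Nodup := by rw [hod0keys]; exact hknd
  have hod0get : ∀ k ∈ keys, od0.getD k ([] : List Int) = [] := by
    intro k hk
    exact PySem.Dict.getD_of_mem_items od0
      (by rw [hod0]; exact List.mem_map_of_mem hk) hod0knd []
  set si := PySem.List.sorted d.items (fun p => p.1) false with hsi
  obtain ⟨hfk, hfv⟩ := outer_fold_spec si od0 hod0knd
  have hkeysmap : d.items.map (fun p => p.1) = d.keys := rfl
  have hdates : si.map (fun p => p.1) = PySem.List.sorted d.keys (fun x => x) false := by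
    rw [hsi, map_key_sorted d.items (fun p => p.1), hkeysmap]
  set odF := si.foldl
    (fun od p => od.keys.foldl
      (fun o k => o.insert k (o.getD k [] ++ [if p.2.contains k then p.2.getD k 0 else 0])) od)
    od0 with hodF
  have hodFk : odF.keys = keys := hfk.trans hod0keys
  have hitems : odF.items = odF.keys.map (fun k => (k, odF.getD k [])) :=
    PySem.Dict.items_eq_map_keys odF (by rw [hodFk]; exact hknd) []
  -- B's transposed index
  set cols := d.items.foldl
    (fun c p => p.2.items.foldl
      (fun c q => c.insert q.1 ((c.getD q.1 PySem.Dict.empty).insert p.1 q.2)) c)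
    (PySem.Dict.empty : PySem.Dict String (PySem.Dict String Int)) with hcols
  have hcolskeys : cols.keys = keys := by
    rw [hcols, cols_keys]; rfl
  have hcolsnd : cols.keys.Nodup := by rw [hcolskeys]; exact hknd
  have hcolsitems : cols.items = cols.keys.map (fun k => (k, cols.getD k PySem.Dict.empty)) :=
    PySem.Dict.items_eq_map_keys cols hcolsnd PySem.Dict.empty
  have hrowsnd : ∀ p ∈ d.items, p.2.keys.Nodup := by
    intro p hp
    have hpm := mem_items_ofList _ p hp
    obtain ⟨q, _, hq⟩ := List.mem_map.mp hpm
    rw [← hq]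
    exact PySem.Dict.nodup_keys_ofList _
  have hmain := outer_main d.items PySem.Dict.empty (by rw [hkeysmap]; exact hndk) hrowsnd
    (by intro k dt _; rw [PySem.Dict.getD_empty, PySem.Dict.getD_empty])
  rw [Prod.mk.injEq]
  refine ⟨?_, by rw [List.nil_append]; exact hdates⟩
  rw [hitems, hodFk, hcolsitems, hcolskeys, List.map_map]
  refine List.map_congr_left ?_
  intro k _
  simp only [Function.comp_apply, Prod.mk.injEq, true_and]
  rw [hfv k (by rw [hod0keys]; assumption)]
  rw [hod0get k (by assumption), List.nil_append, ← hdates, List.map_map]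
  refine List.map_congr_left ?_
  intro p hp
  have hpm : p ∈ d.items := (PySem.List.mem_sorted d.items (fun p => p.1) false p).mp hp
  have := hmain p hpm k
  rw [← hcols] at this
  simp only [Function.comp_apply]
  rw [this]
  by_cases h : p.2.contains k
  · rw [if_pos h]
  · rw [if_neg (by simpa using h), PySem.Dict.getD_of_not_contains _ _ (by simpa using h)]
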